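-- pv_equiv track=rewrite | github.com/IchBinJade/advent-of-code-python | 2015/day01.py | part_two
-- ===== SOURCE A (Python) =====
-- def part_two(data_input):
--     total = 0
--     for idx, char in enumerate(data_input[0]):
--         if char == "(":
--             total += 1
--         else:
--             total -= 1
--         if total == -1:
--             return idx + 1
--
--     return total
-- ===== SOURCE B (Python) =====
-- def part_two(data_input):
--     deltas = [1 if c == "(" else -1 for c in data_input[0]]
--     prefixes = []
--     t = 0
--     for d in deltas:
--         t += d
--         prefixes.append(t)
--     for i, v in enumerate(prefixes):
--         if v == -1:
--             return i + 1
--     return t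
-- ===== Notes on version B (the rewrite author's own statement) =====
-- stated objective: alternative
-- what changed: B separates the computation into three passes: map each char to a +1/-1 delta, build the full prefix-sum list, then search that list for the first -1 (falling back to the final sum), instead of A's single fused loop with an early return.
import Mathlib
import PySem

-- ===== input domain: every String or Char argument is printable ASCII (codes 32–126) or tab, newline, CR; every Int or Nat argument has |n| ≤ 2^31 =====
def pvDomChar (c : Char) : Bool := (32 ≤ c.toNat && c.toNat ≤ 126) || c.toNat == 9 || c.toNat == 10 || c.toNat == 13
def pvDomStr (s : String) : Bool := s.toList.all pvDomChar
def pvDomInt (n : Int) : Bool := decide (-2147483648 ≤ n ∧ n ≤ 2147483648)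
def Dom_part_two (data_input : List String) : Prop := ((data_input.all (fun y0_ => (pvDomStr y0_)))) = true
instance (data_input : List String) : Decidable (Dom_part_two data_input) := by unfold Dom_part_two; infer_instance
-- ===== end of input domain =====

-- B differs only in structure; A's fused loop is reproduced exactly on all non-raising inputs.

-- ===== PORT A =====
-- A's single loop: running total and enumerate index, early return on total == -1.
def part_two_loopA : List Char → Int → Int → Int
  | [], total, _ => total
  | c :: rest, total, idx =>
    let total' := if c = '(' then total + 1 else total - 1
    if total' = -1 then idx + 1 else part_two_loopA rest total' (idx + 1)

def part_two (data_input : List String) : Int :=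
  match data_input with
  | [] => 0          -- data_input[0] raises IndexError in Python; excluded by Pre_
  | s :: _ => part_two_loopA s.toList 0 0

-- ===== PORT B =====
-- B pass 1: map each char to its delta.
def part_two_deltas (l : List Char) : List Int :=
  l.map (fun c => if c = '(' then 1 else -1)

-- B pass 2: prefix sums together with the final total t.
def part_two_accum : List Int → Int → List Int × Int
  | [], t => ([], t)
  | d :: rest, t =>
    let p := part_two_accum rest (t + d)
    ((t + d) :: p.1, p.2)

-- B pass 3: first index whose prefix sum is -1.
def part_two_findHit : List Int → Option Nat
  | [] => none
  | v :: rest => if v = -1 then some 0 else (part_two_findHit rest).map (· + 1)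

def part_two_alt (data_input : List String) : Int :=
  match data_input with
  | [] => 0          -- data_input[0] raises IndexError in Python; excluded by Pre_
  | s :: _ =>
    let p := part_two_accum (part_two_deltas s.toList) 0
    match part_two_findHit p.1 with
    | some i => (i : Int) + 1
    | none => p.2

-- ===== PRECONDITION & SPEC =====
-- Pre_ excludes only the empty list, on which Python's data_input[0] raises IndexError in both A and B.
def Pre_part_two (data_input : List String) : Prop := data_input ≠ []
instance (data_input : List String) : Decidable (Pre_part_two data_input) := by unfold Pre_part_two; infer_instance
def pvWitness_part_two : List String := ["(()))"]

def Spec_part_two (data_input : List String) (out : Int) : Prop := out = part_two_alt data_input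
instance (data_input : List String) (out : Int) : Decidable (Spec_part_two data_input out) := by unfold Spec_part_two; infer_instance

-- ===== CLAIM (what is proved, stated in full; the proofs are below) =====
def Claim_equal_part_two : Prop := ∀ (data_input : List String), Dom_part_two data_input → Pre_part_two data_input → Spec_part_two data_input (part_two data_input)

-- ===== LEMMAS AND PROOFS =====
theorem part_two_loop_eq (l : List Char) : ∀ (total idx : Int),
    part_two_loopA l total idx =
      (let p := part_two_accum (l.map (fun c => if c = '(' then (1:Int) else -1)) total
       match part_two_findHit p.1 with
       | some i => idx + 1 + (i : Int)
       | none => p.2) := by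
  induction l with
  | nil => intro total idx; simp [part_two_loopA, part_two_accum, part_two_findHit]
  | cons c rest ih =>
    intro total idx
    simp only [part_two_loopA, List.map_cons, part_two_accum]
    have hd : (if c = '(' then total + 1 else total - 1) = total + (if c = '(' then (1:Int) else -1) := by
      split_ifs <;> ring
    rw [hd]
    by_cases h : total + (if c = '(' then (1:Int) else -1) = -1
    · simp [part_two_findHit, h]
    · simp only [if_neg h, part_two_findHit]
      rw [ih]
      cases hf : part_two_findHit (part_two_accum (rest.map (fun c => if c = '(' then (1:Int) else -1)) (total + (if c = '(' then (1:Int) else -1))).1 with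
      | none => simp [hf]
      | some i =>
        simp only [hf, Option.map_some]
        push_cast; ring

-- ===== VERDICT (by name: the statement is the Claim_ definition above) =====
theorem part_two_spec : Claim_equal_part_two := by
  intro data_input _ hpre
  unfold Spec_part_two part_two part_two_alt
  match data_input with
  | [] => exact absurd rfl hpre
  | s :: _ =>
    simp only [part_two_deltas]
    rw [part_two_loop_eq]
    cases hf : part_two_findHit (part_two_accum (s.toList.map (fun c => if c = '(' then (1:Int) else -1)) 0).1 with
    | none => simp [hf]
    | some i => simp only [hf]; push_cast; ring
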